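-- pv_equiv track=rewrite | github.com/anraku/competition-go | abc124/d.py | stand1
-- ===== SOURCE A (Python) =====
-- def stand1(s, index):
--     s_list = list(s)
--     index = 0
--     for i in range(index, len(s_list)):
--         if s_list[i] == '0':
--             s_list[i] = '1'
--         else:
--             index = i
--             break
--
--     return "".join(s_list), i
-- ===== SOURCE B (Python) =====
-- def stand1(s, index):
--     t = s.lstrip('0')
--     n = len(s) - len(t)
--     return '1' * n + t, (n if t else len(s) - 1)
-- ===== Notes on version B (the rewrite author's own statement) =====
-- stated objective: simpler
-- what changed: B replaces A's per-character list-mutation loop with break by a loop-free lstrip('0') plus string arithmetic: count the stripped zeros and prepend that many '1's.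
import Mathlib
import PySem

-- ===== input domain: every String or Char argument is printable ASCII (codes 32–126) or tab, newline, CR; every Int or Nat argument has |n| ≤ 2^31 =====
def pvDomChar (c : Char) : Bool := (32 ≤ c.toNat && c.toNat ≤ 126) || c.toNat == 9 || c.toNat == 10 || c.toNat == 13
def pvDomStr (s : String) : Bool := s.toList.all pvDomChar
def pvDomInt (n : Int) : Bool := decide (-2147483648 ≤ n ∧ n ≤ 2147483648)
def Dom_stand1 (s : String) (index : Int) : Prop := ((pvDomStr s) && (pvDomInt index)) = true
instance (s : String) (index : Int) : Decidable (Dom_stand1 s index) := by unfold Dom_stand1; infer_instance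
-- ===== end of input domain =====

-- B replaces A's per-character flip-loop-with-break by lstrip('0') + string arithmetic (simpler, same cost);
-- Pre_ excludes the empty string, where A raises UnboundLocalError while B returns ("", -1).


-- ===== PORT A =====
-- A's for-loop over the list with in-place mutation and break; after a completed
-- loop Python's i is len-1 (on the empty string Python raises: excluded by Pre_).
def stand1Go (l : List Char) (i : Nat) : List Char × Int :=
  if h : i < l.length then
    if l[i] == '0' then stand1Go (l.set i '1') (i + 1)
    else (l, (i : Int))
  else (l, (i : Int) - 1)
termination_by l.length - i
decreasing_by simp; omega

def stand1 (s : String) (index : Int) : String × Int :=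
  let r := stand1Go s.toList 0
  (String.mk r.1, r.2)

-- ===== PORT B =====
-- Source B: t = s.lstrip('0') (exact: dropWhile (== '0')); n = len(s) - len(t);
-- return '1'*n + t, (n if t else len(s)-1).
def stand1_alt (s : String) (index : Int) : String × Int :=
  let t := s.toList.dropWhile (· == '0')
  let n := s.toList.length - t.length
  (String.mk (List.replicate n '1' ++ t),
   if t ≠ [] then (n : Int) else (s.toList.length : Int) - 1)

-- ===== PRECONDITION & SPEC =====
-- Pre_ excludes only the empty string, on which Python A raises UnboundLocalError.
def Pre_stand1 (s : String) (index : Int) : Prop := s ≠ ""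
instance (s : String) (index : Int) : Decidable (Pre_stand1 s index) := by unfold Pre_stand1; infer_instance
def pvWitness_stand1 : String × Int := ("0010", 0)

def Spec_stand1 (s : String) (index : Int) (out : String × Int) : Prop := out = stand1_alt s index
instance (s : String) (index : Int) (out : String × Int) : Decidable (Spec_stand1 s index out) := by unfold Spec_stand1; infer_instance

-- ===== CLAIM (what is proved, stated in full; the proofs are below) =====
def Claim_equal_stand1 : Prop := ∀ (s : String) (index : Int), Dom_stand1 s index → Pre_stand1 s index → Spec_stand1 s index (stand1 s index)

-- ===== LEMMAS AND PROOFS =====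

-- A's loop, started at position i with the first i characters already flipped to '1',
-- produces exactly B's shape on the remaining suffix d.
theorem stand1Go_spec (d : List Char) : ∀ (i : Nat) (l : List Char),
    l = List.replicate i '1' ++ d →
    stand1Go l i =
      (List.replicate (i + (d.takeWhile (· == '0')).length) '1' ++ d.dropWhile (· == '0'),
       if d.dropWhile (· == '0') ≠ [] then ((i + (d.takeWhile (· == '0')).length : Nat) : Int)
       else (l.length : Int) - 1) := by
  induction d with
  | nil =>
      intro i l hl
      have hlen : l.length = i := by simp [hl]
      rw [stand1Go]
      simp [hlen, hl]
  | cons c d' ih =>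
      intro i l hl
      have hlen : l.length = i + 1 + d'.length := by simp [hl]; omega
      have hi : i < l.length := by omega
      have hget : l[i]'hi = c := by
        subst hl
        rw [List.getElem_append_right (by simp)]
        simp
      rw [stand1Go]
      simp only [dif_pos hi, hget]
      by_cases hc : c = '0'
      · subst hc
        have hset : l.set i '1' = List.replicate (i + 1) '1' ++ d' := by
          subst hl
          rw [List.set_append]
          simp [List.replicate_succ' (n := i)]
        rw [if_pos (by decide), ih (i + 1) _ hset]
        have hlen2 : (l.set i '1').length = l.length := by simp
        simp only [List.takeWhile, List.dropWhile, hlen2]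
        norm_num
        constructor
        · omega
        · split_ifs with h1 <;> simp_all <;> omega
      · have hcb : (c == '0') = false := by simpa using hc
        rw [if_neg (by simp [hcb])]
        simp [List.takeWhile, List.dropWhile, hcb, hl]

-- ===== VERDICT (by name: the statement is the Claim_ definition above) =====
theorem stand1_spec : Claim_equal_stand1 := by
  intro s index _ _
  unfold Spec_stand1 stand1 stand1_alt
  have h := stand1Go_spec s.toList 0 s.toList (by simp)
  rw [h]
  have hlt : (s.toList.takeWhile (· == '0')).length + (s.toList.dropWhile (· == '0')).length = s.toList.length := by
    rw [← List.length_append, List.takeWhile_append_dropWhile]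
  simp only [Nat.zero_add]
  have hs : s.length = s.toList.length := by simp
  have hn : s.toList.length - (s.toList.dropWhile (· == '0')).length = (s.toList.takeWhile (· == '0')).length := by omega
  rw [hn]
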